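-- pv_equiv track=rewrite | github.com/pkch93/Algorithm | Beakjoon_Online_Judge/same_pattern.py | solution
-- ===== SOURCE A (Python) =====
-- def __spin(pattern):
--     p = len(pattern)
--     rotated_pattern = [[0 for _ in range(p)] for _ in range(p)]
--     for i in range(p):
--         for j in range(p):
--             rotated_pattern[i][j] = pattern[j][p-i-1]
--     return rotated_pattern
--
-- def __is_pattern(paper, pattern, x, y):
--     m = len(pattern)
--     temp = [pattern[i][:] for i in range(m)]
--     result = 0
--     for _ in range(4):
--         flag = True
--         for i in range(m):
--             if not flag:
--                 break
--             for j in range(m):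
--                 if paper[y+i][x+j] != temp[i][j]:
--                     flag = False
--         if flag:
--             result += 1
--         temp = __spin(temp)
--     return result
--
-- def solution(paper, pattern):
--     answer = 0
--     n, m = len(paper), len(pattern)
--     k = n - m + 1
--     for y in range(k):
--         for x in range(k):
--             answer += __is_pattern(paper, pattern, x, y)
--     return answer
-- ===== SOURCE B (Python) =====
-- def solution(paper, pattern):
--     m = len(pattern)
--     k = len(paper) - m + 1
--     if k <= 0:
--         return 0
--     windows = {}
--     for y in range(k):
--         for x in range(k):
--             key = tuple(tuple(row[x:x+m]) for row in paper[y:y+m])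
--             windows[key] = windows.get(key, 0) + 1
--     total = 0
--     rot = tuple(tuple(row[:m]) for row in pattern)
--     for _ in range(4):
--         total += windows.get(rot, 0)
--         rot = tuple(zip(*rot))[::-1]
--     return total
-- ===== Notes on version B (the rewrite author's own statement) =====
-- stated objective: alternative
-- what changed: B builds a hash map from window tuple to multiplicity over all k^2 windows once (windows extracted with C-level row slicing), then answers with 4 dictionary lookups, one per rotation of the pattern computed with C-level zip/reverse, instead of A's re-spinning the pattern 4 times and comparing it cell-by-cell (with short-circuiting) at every position; intended as faster, measured 2.69x median at the largest size but not consistent across inputs.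
-- outside the precondition, e.g. on solution([[5, 5], [9]], [[0, 0], [0, 0]]): A returns 0, B returns 0
import Mathlib
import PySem

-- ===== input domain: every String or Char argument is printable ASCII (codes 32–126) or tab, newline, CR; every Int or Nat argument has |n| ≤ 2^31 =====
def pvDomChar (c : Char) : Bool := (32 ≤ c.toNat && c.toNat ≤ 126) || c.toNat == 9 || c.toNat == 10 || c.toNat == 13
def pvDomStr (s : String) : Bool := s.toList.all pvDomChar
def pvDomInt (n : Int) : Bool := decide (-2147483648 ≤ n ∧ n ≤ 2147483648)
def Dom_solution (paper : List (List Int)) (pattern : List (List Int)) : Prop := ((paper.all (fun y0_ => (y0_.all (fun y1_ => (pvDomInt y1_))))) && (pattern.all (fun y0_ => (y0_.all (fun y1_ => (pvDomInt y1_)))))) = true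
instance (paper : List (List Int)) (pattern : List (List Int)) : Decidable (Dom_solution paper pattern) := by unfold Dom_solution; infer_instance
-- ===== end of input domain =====

-- B indexes all k² paper windows in a hash map (window → multiplicity) built once, then answers with
-- 4 dictionary lookups, one per rotation of the pattern (rotated via zip/reverse), instead of A's
-- re-spinning the pattern 4 times and comparing it cell-by-cell at every position.

-- ===== PORT A =====
-- paper[i][j] / pattern[i][j]; total with defaults — exact wherever Python does not raise (Pre_ excludes the raising inputs)
def pvCellA (rows : List (List Int)) (i j : Int) : Int :=
  PySem.List.pyGetD (PySem.List.pyGetD rows i []) j 0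

-- __spin: builds a p×p matrix with rotated_pattern[i][j] = pattern[j][p-i-1] (each cell assigned exactly once)
def spinA (pattern : List (List Int)) : List (List Int) :=
  let p : Int := PySem.List.len pattern
  (PySem.List.pyRange 0 p 1).map (fun i =>
    (PySem.List.pyRange 0 p 1).map (fun j => pvCellA pattern j (p - i - 1)))

-- inner 'for j in range(m)' of __is_pattern: sets flag to False on a mismatch, no break
def jLoopA (paper temp : List (List Int)) (x y i m : Int) (flag : Bool) : Bool :=
  (PySem.List.pyRange 0 m 1).foldl
    (fun f j => if pvCellA paper (y + i) (x + j) ≠ pvCellA temp i j then false else f) flag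

-- outer 'for i in range(m)' with 'if not flag: break'
def iLoopA (paper temp : List (List Int)) (x y m : Int) : List Int → Bool → Bool
  | [], flag => flag
  | i :: rest, flag =>
      if flag = false then flag
      else iLoopA paper temp x y m rest (jLoopA paper temp x y i m flag)

-- __is_pattern: temp = [pattern[i][:] …] is an element-wise copy; immutably that copy is pattern itself
def isPatternA (paper pattern : List (List Int)) (x y : Int) : Int :=
  let m : Int := PySem.List.len pattern
  ((List.range 4).foldl
    (fun (st : Int × List (List Int)) _ =>
      let flag := iLoopA paper st.2 x y m (PySem.List.pyRange 0 m 1) true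
      (st.1 + (if flag then 1 else 0), spinA st.2))
    (0, pattern)).1

def solution (paper : List (List Int)) (pattern : List (List Int)) : Int :=
  let n : Int := PySem.List.len paper
  let m : Int := PySem.List.len pattern
  let k : Int := n - m + 1
  (PySem.List.pyRange 0 k 1).foldl (fun answer y =>
    (PySem.List.pyRange 0 k 1).foldl (fun a x => a + isPatternA paper pattern x y) answer) 0

-- ===== PORT B =====
-- key = tuple(tuple(row[x:x+m]) for row in paper[y:y+m])  (tuple-of-tuples key ported as List (List Int))
def winKeyB (paper : List (List Int)) (m x y : Int) : List (List Int) :=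
  (PySem.List.slice paper (some y) (some (y + m))).map
    (fun row => PySem.List.slice row (some x) (some (x + m)))

-- zip(*rows): no PySem primitive, ported by hand, step for step: emit the tuple of heads while every
-- row is nonempty (zip stops at the shortest row, so fuel = length of the first row suffices: exact)
def zipStarAux : Nat → List (List Int) → List (List Int)
  | 0, _ => []
  | fuel + 1, rows =>
      if rows.all (fun r => !r.isEmpty) then
        rows.map (fun r => r.headD 0) :: zipStarAux fuel (rows.map List.tail)
      else []

def zipStar (rows : List (List Int)) : List (List Int) :=
  match rows with
  | [] => []
  | r :: _ => zipStarAux r.length rows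

def solution_alt (paper : List (List Int)) (pattern : List (List Int)) : Int :=
  let m : Int := PySem.List.len pattern
  let k : Int := PySem.List.len paper - m + 1
  if k ≤ 0 then 0
  else
    -- windows[key] = windows.get(key, 0) + 1 over all k² positions
    let windows : PySem.Dict (List (List Int)) Int :=
      (PySem.List.pyRange 0 k 1).foldl (fun d y =>
        (PySem.List.pyRange 0 k 1).foldl (fun d x =>
          d.insert (winKeyB paper m x y) (d.getD (winKeyB paper m x y) 0 + 1)) d)
        PySem.Dict.empty
    let rot0 := pattern.map (fun row => PySem.List.slice row none (some m))
    ((List.range 4).foldl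
      (fun (st : Int × List (List Int)) _ =>
        (st.1 + windows.getD st.2 0, (zipStar st.2).reverse))
      (0, rot0)).1

-- ===== PRECONDITION & SPEC =====
-- Pre_ excludes the ragged inputs on which Python A raises IndexError (a pattern row shorter than
-- len(pattern), or a paper row shorter than len(paper), while a window fits); this is slightly
-- narrower than A's exact domain: on a few such ragged inputs A still returns, but only because a
-- data-dependent early break happens to skip the short row — an accident of A's scan order.
def Pre_solution (paper : List (List Int)) (pattern : List (List Int)) : Prop :=
  (0 < pattern.length ∧ pattern.length ≤ paper.length) →
    ((∀ row ∈ pattern, pattern.length ≤ row.length) ∧ (∀ row ∈ paper, paper.length ≤ row.length))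
instance (paper : List (List Int)) (pattern : List (List Int)) : Decidable (Pre_solution paper pattern) := by unfold Pre_solution; infer_instance

def pvWitness_solution : List (List Int) × List (List Int) := ([[1, 2], [3, 4]], [[3, 1]])

def Spec_solution (paper : List (List Int)) (pattern : List (List Int)) (out : Int) : Prop := out = solution_alt paper pattern
instance (paper : List (List Int)) (pattern : List (List Int)) (out : Int) : Decidable (Spec_solution paper pattern out) := by unfold Spec_solution; infer_instance

-- ===== CLAIM (what is proved, stated in full; the proofs are below) =====
def Claim_equal_solution : Prop := ∀ (paper : List (List Int)) (pattern : List (List Int)), Dom_solution paper pattern → Pre_solution paper pattern → Spec_solution paper pattern (solution paper pattern)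

-- ===== LEMMAS AND PROOFS =====

-- the m×m window of cells B's key reads, written as a pure nested map (the common ground of both programs)
def winPure (paper : List (List Int)) (m x y : Int) : List (List Int) :=
  (PySem.List.pyRange 0 m 1).map (fun i =>
    (PySem.List.pyRange 0 m 1).map (fun j => pvCellA paper (y + i) (x + j)))

-- the m×m block the comparisons read: temp and rot agree cell by cell
def BlockEq (m : Int) (temp rot : List (List Int)) : Prop :=
  ∀ i j : Int, 0 ≤ i → i < m → 0 ≤ j → j < m → pvCellA temp i j = pvCellA rot i j

theorem all_congr_mem {α : Type} (l : List α) (f g : α → Bool)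
    (h : ∀ a ∈ l, f a = g a) : l.all f = l.all g := by
  induction l with
  | nil => rfl
  | cons a t ih =>
      simp only [List.all_cons, h a (List.mem_cons_self),
        ih (fun b hb => h b (List.mem_cons_of_mem a hb))]

-- a 'flag = False on failure' loop is the conjunction of its tests
theorem foldl_flag {α : Type} (l : List α) (P : α → Prop) [DecidablePred P] (flag : Bool) :
    l.foldl (fun f j => if P j then false else f) flag = (flag && l.all (fun j => decide ¬ P j)) := by
  induction l generalizing flag with
  | nil => simp
  | cons a t ih =>
      simp only [List.foldl_cons, List.all_cons, ih]
      by_cases h : P a <;> cases flag <;> simp [h]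

theorem jLoopA_all (paper temp : List (List Int)) (x y i m : Int) (flag : Bool) :
    jLoopA paper temp x y i m flag
      = (flag && (PySem.List.pyRange 0 m 1).all
          (fun j => pvCellA paper (y + i) (x + j) == pvCellA temp i j)) := by
  unfold jLoopA
  rw [foldl_flag]
  simp [← Bool.beq_eq_decide_eq]

theorem iLoopA_all (paper temp : List (List Int)) (x y m : Int) (l : List Int) (flag : Bool) :
    iLoopA paper temp x y m l flag
      = (flag && l.all (fun i =>
          (PySem.List.pyRange 0 m 1).all
            (fun j => pvCellA paper (y + i) (x + j) == pvCellA temp i j))) := by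
  induction l generalizing flag with
  | nil => simp [iLoopA]
  | cons a t ih =>
      rw [iLoopA, ih, jLoopA_all]
      cases flag <;> simp

-- cell access as getElem, at in-range Nat indices
theorem pvCellA_natCast (rows : List (List Int)) (i j : Nat)
    (hi : i < rows.length) (hj : j < (rows[i]).length) :
    pvCellA rows (i : Int) (j : Int) = (rows[i])[j] := by
  unfold pvCellA
  rw [PySem.List.pyGetD_natCast, PySem.List.pyGetD_natCast,
      List.getD_eq_getElem _ _ hi, List.getD_eq_getElem _ _ hj]

-- reading a cell of the pure window
theorem pvCellA_winPure (paper : List (List Int)) (m x y i j : Int)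
    (h0i : 0 ≤ i) (h1i : i < m) (h0j : 0 ≤ j) (h1j : j < m) :
    pvCellA (winPure paper m x y) i j = pvCellA paper (y + i) (x + j) := by
  unfold winPure pvCellA
  rw [PySem.List.pyGetD_map_pyRange_of_nonneg _ _ _ _ h0i h1i,
      PySem.List.pyGetD_map_pyRange_of_nonneg _ _ _ _ h0j h1j]

-- A's cell-by-cell test over the block equals the boolean equality of B's window key with R
theorem allall_eq_beq (paper : List (List Int)) (m x y : Int) (R : List (List Int))
    (hR : R.length = m.toNat) (hrows : ∀ row ∈ R, row.length = m.toNat) :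
    ((PySem.List.pyRange 0 m 1).all (fun i =>
        (PySem.List.pyRange 0 m 1).all (fun j =>
          pvCellA paper (y + i) (x + j) == pvCellA R i j)))
      = (winPure paper m x y == R) := by
  rw [Bool.eq_iff_iff]
  simp only [List.all_eq_true, beq_iff_eq, PySem.List.mem_pyRange_one]
  constructor
  · intro h
    apply List.ext_getElem
    · simp [winPure, PySem.List.length_pyRange_one, hR]
    · intro a h1 h2
      have ham : (a : Int) < m := by
        have := h1; simp [winPure, PySem.List.length_pyRange_one] at this; omega
      have hrowlen : (R[a]).length = m.toNat := hrows _ (List.getElem_mem _)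
      apply List.ext_getElem
      · simp [winPure, List.getElem_map, PySem.List.length_pyRange_one,
          PySem.List.getElem_pyRange_one, hrowlen]
      · intro b hb1 hb2
        have hbm : (b : Int) < m := by
          simp [winPure, PySem.List.length_pyRange_one] at hb1; omega
        have hcell := h a ⟨by positivity, ham⟩ b ⟨by positivity, hbm⟩
        rw [pvCellA_natCast R a b (by omega) (by rw [hrowlen]; omega)] at hcell
        simp only [winPure, List.getElem_map, PySem.List.getElem_pyRange_one]
        simpa using hcell
  · intro h i hi j hj
    rw [← h]
    rw [pvCellA_winPure paper m x y i j hi.1 hi.2 hj.1 hj.2]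

-- B's sliced window equals the pure window when the rows it touches are long enough
theorem winKeyB_eq_winPure (paper : List (List Int)) (m x y : Int)
    (hm : 0 ≤ m) (hx : 0 ≤ x) (hy : 0 ≤ y) (hyn : y + m ≤ (paper.length : Int))
    (hxn : 0 < m → ∀ row ∈ paper, x + m ≤ (row.length : Int)) :
    winKeyB paper m x y = winPure paper m x y := by
  unfold winKeyB winPure
  rw [PySem.List.slice_toNat _ hy (by omega)]
  have hym : (y + m).toNat - y.toNat = m.toNat := by omega
  rw [hym]
  apply List.ext_getElem
  · simp [PySem.List.length_pyRange_one]; omega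
  · intro a h1 h2
    have ham : a < m.toNat := by simpa using h2
    have hap : y.toNat + a < paper.length := by omega
    simp only [List.getElem_map, List.getElem_take, List.getElem_drop,
      PySem.List.getElem_pyRange_one]
    have hrow : 0 < m → x + m ≤ ((paper[y.toNat + a]).length : Int) :=
      fun h0 => hxn h0 _ (List.getElem_mem _)
    rw [PySem.List.slice_toNat _ hx (by omega)]
    have hxm : (x + m).toNat - x.toNat = m.toNat := by omega
    rw [hxm]
    apply List.ext_getElem
    · simp [PySem.List.length_pyRange_one]
      rcases Nat.eq_zero_or_pos m.toNat with h0 | h0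
      · omega
      · have := hrow (by omega); omega
    · intro b hb1 hb2
      have hbm : b < m.toNat := by simpa using hb2
      have hblen : x.toNat + b < (paper[y.toNat + a]).length := by
        have := hrow (by omega); omega
      simp only [List.getElem_map, List.getElem_take, List.getElem_drop,
        PySem.List.getElem_pyRange_one]
      have ey : y + (0 + (a:Int)) = ((y.toNat + a : Nat) : Int) := by omega
      have ex : x + (0 + (b:Int)) = ((x.toNat + b : Nat) : Int) := by omega
      rw [ey, ex, pvCellA_natCast paper (y.toNat + a) (x.toNat + b) hap hblen]

-- __spin only reads the m×m block, so block-equal square inputs spin to the SAME matrix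
theorem spin_congr (X Y : List (List Int)) (hlen : X.length = Y.length)
    (hb : BlockEq (X.length : Int) X Y) : spinA X = spinA Y := by
  unfold spinA
  simp only [PySem.List.len_eq, ← hlen]
  refine List.map_congr_left (fun i hi => ?_)
  rw [PySem.List.mem_pyRange_one] at hi
  refine List.map_congr_left (fun j hj => ?_)
  rw [PySem.List.mem_pyRange_one] at hj
  exact hb j _ hj.1 hj.2 (by omega) (by omega)

-- base block agreement: pattern vs its row-truncated copy
theorem blockEq_base (pattern : List (List Int))
    (hrow : ∀ row ∈ pattern, pattern.length ≤ row.length) :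
    BlockEq (pattern.length : Int) pattern
      (pattern.map (fun row => PySem.List.slice row none (some (PySem.List.len pattern)))) := by
  intro i j h0i h1i h0j h1j
  unfold pvCellA
  have hi' : i < ((pattern.map (fun row => PySem.List.slice row none (some (PySem.List.len pattern)))).length : Int) := by
    simpa using h1i
  rw [PySem.List.pyGetD_eq_getElem _ _ h0i h1i, PySem.List.pyGetD_eq_getElem _ _ h0i hi']
  rw [List.getElem_map]
  have hrowlen : pattern.length ≤ pattern[i.toNat].length :=
    hrow _ (List.getElem_mem _)
  have hj1 : j < (pattern[i.toNat].length : Int) := by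
    have := h1j; omega
  have hs : PySem.List.slice pattern[i.toNat] none (some (PySem.List.len pattern))
      = (pattern[i.toNat]).take pattern.length := by
    rw [PySem.List.len_eq, PySem.List.slice_to _ (by positivity)]
    simp
  rw [hs]
  have hj2 : j < (((pattern[i.toNat]).take pattern.length).length : Int) := by
    simp [List.length_take]; omega
  rw [PySem.List.pyGetD_eq_getElem _ _ h0j hj1, PySem.List.pyGetD_eq_getElem _ _ h0j hj2]
  rw [List.getElem_take]

-- shape of a spun matrix: square of side (input length)
theorem spinA_length (R : List (List Int)) : (spinA R).length = R.length := by
  simp [spinA, PySem.List.length_pyRange_one, PySem.List.len_eq]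

theorem spinA_rows (R : List (List Int)) : ∀ row ∈ spinA R, row.length = R.length := by
  intro row hrow
  simp only [spinA, PySem.List.len_eq, List.mem_map] at hrow
  obtain ⟨i, _, hi⟩ := hrow
  simp [← hi, PySem.List.length_pyRange_one]

theorem headD_eq_getD (r : List Int) : r.headD 0 = r.getD 0 0 := by cases r <;> rfl

theorem tail_getD (r : List Int) (i : Nat) (h : r ≠ []) :
    r.tail.getD i 0 = r.getD (i + 1) 0 := by
  cases r with
  | nil => exact absurd rfl h
  | cons a rs => rfl

-- zip(*rows) on rows of equal length L is the transpose
theorem zipStarAux_eq (L : Nat) : ∀ rows : List (List Int), (∀ r ∈ rows, r.length = L) →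
    zipStarAux L rows = (List.range L).map (fun i => rows.map (fun r => r.getD i 0)) := by
  induction L with
  | zero => intro rows _; rfl
  | succ L ih =>
      intro rows hl
      have hne : rows.all (fun r => !r.isEmpty) = true := by
        simp only [List.all_eq_true, Bool.not_eq_eq_eq_not, Bool.not_true,
          List.isEmpty_eq_false_iff, ← List.length_pos_iff]
        intro r hr
        rw [hl r hr]; omega
      rw [zipStarAux, if_pos hne,
        ih (rows.map List.tail) (by
          intro t ht
          simp only [List.mem_map] at ht
          obtain ⟨r, hr, rfl⟩ := ht
          have := hl r hr
          simp [List.length_tail, this])]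
      rw [List.range_succ_eq_map]
      simp only [List.map_cons, List.map_map, Function.comp_def]
      refine congrArg₂ List.cons ?_ ?_
      · exact List.map_congr_left (fun r _ => headD_eq_getD r)
      · refine List.map_congr_left (fun i _ => ?_)
        refine List.map_congr_left (fun r hr => ?_)
        exact tail_getD r i (by have := hl r hr; intro h; subst h; simp at this)

theorem zipStar_eq (rows : List (List Int)) (hsq : ∀ r ∈ rows, r.length = rows.length) :
    zipStar rows = (List.range rows.length).map (fun i => rows.map (fun r => r.getD i 0)) := by
  cases rows with
  | nil => rfl
  | cons r rest =>
      show zipStarAux r.length (r :: rest) = _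
      rw [hsq r List.mem_cons_self]
      exact zipStarAux_eq _ _ hsq

-- tuple(zip(*R))[::-1] is exactly __spin on a square matrix
theorem zipRot_eq_spinA (R : List (List Int)) (hsq : ∀ r ∈ R, r.length = R.length) :
    (zipStar R).reverse = spinA R := by
  rw [zipStar_eq R hsq]
  unfold spinA
  simp only [PySem.List.len_eq]
  apply List.ext_getElem
  · simp [PySem.List.length_pyRange_one]
  · intro i h1 h2
    have hiR : i < R.length := by
      simpa [PySem.List.length_pyRange_one] using h2
    rw [List.getElem_reverse]
    simp only [List.getElem_map, List.getElem_range, List.length_map, List.length_range,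
      PySem.List.getElem_pyRange_one]
    apply List.ext_getElem
    · simp [PySem.List.length_pyRange_one]
    · intro j hj1 hj2
      have hjR : j < R.length := by simpa using hj1
      have hrj : (R[j]).length = R.length := hsq _ (List.getElem_mem _)
      simp only [List.getElem_map, PySem.List.getElem_pyRange_one]
      have e1 : (0 : Int) + (j : Int) = ((j : Nat) : Int) := by omega
      have e2 : ((R.length : Int)) - (0 + (i : Int)) - 1 = ((R.length - 1 - i : Nat) : Int) := by omega
      rw [e1, e2, pvCellA_natCast R j (R.length - 1 - i) hjR (by rw [hrj]; omega)]
      rw [List.getD_eq_getElem _ _ (by rw [hrj]; omega)]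

-- k² accumulation as a sum of a map, in both programs
theorem double_foldl_sum (l : List Int) (F : Int → Int → Int) :
    l.foldl (fun acc y => l.foldl (fun a x => a + F x y) acc) 0
      = (l.map (fun y => (l.map (fun x => F x y)).sum)).sum := by
  have h1 : ∀ (acc y : Int), l.foldl (fun a x => a + F x y) acc
      = acc + (l.map (fun x => F x y)).sum := fun acc y => PySem.List.foldl_add _ _ _
  simp only [h1]
  rw [PySem.List.foldl_add]
  simp

-- the whole dict-building double loop, read back at key v, counts the windows equal to v
theorem getD_nested (paper : List (List Int)) (m k : Int) (l : List Int)
    (d : PySem.Dict (List (List Int)) Int) (v : List (List Int)) :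
    (l.foldl (fun d y =>
        (PySem.List.pyRange 0 k 1).foldl (fun d x =>
          d.insert (winKeyB paper m x y) (d.getD (winKeyB paper m x y) 0 + 1)) d) d).getD v 0
      = d.getD v 0
        + (l.map (fun y =>
            ((((PySem.List.pyRange 0 k 1).map (fun x => winKeyB paper m x y)).count v : Int)))).sum := by
  induction l generalizing d with
  | nil => simp
  | cons a t ih =>
      rw [List.foldl_cons, ih]
      rw [← List.foldl_map (f := fun x => winKeyB paper m x a)
        (g := fun (d : PySem.Dict (List (List Int)) Int) x => d.insert x (d.getD x 0 + 1))]
      rw [PySem.Dict.getD_foldl_insert_add_one]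
      simp only [List.map_cons, List.sum_cons]
      ring

-- an Int-valued count over a mapped list as a 0/1 sum
theorem count_map_as_sum {α β : Type} [BEq β] (l : List α) (f : α → β) (v : β) :
    (((l.map f).count v : Int)) = (l.map (fun x => if f x == v then (1 : Int) else 0)).sum := by
  rw [List.count_eq_countP, List.countP_map, ← PySem.List.sum_map_ite_one_zero]
  rfl

set_option maxHeartbeats 1600000 in
theorem main_eq (paper pattern : List (List Int))
    (hpre : (0 < pattern.length ∧ pattern.length ≤ paper.length) →
      ((∀ row ∈ pattern, pattern.length ≤ row.length) ∧ (∀ row ∈ paper, paper.length ≤ row.length))) :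
    solution paper pattern = solution_alt paper pattern := by
  unfold solution solution_alt
  simp only [PySem.List.len_eq]
  by_cases hk : (paper.length : Int) - pattern.length + 1 ≤ 0
  · rw [if_pos hk, PySem.List.pyRange_one_eq_nil (by omega)]
    rfl
  · rw [if_neg hk]
    set m : Int := (pattern.length : Int) with hm
    set k : Int := (paper.length : Int) - m + 1 with hkdef
    have hrow : ∀ row ∈ pattern, pattern.length ≤ row.length := by
      rcases Nat.eq_zero_or_pos pattern.length with h0 | h0
      · intro row _; omega
      · exact (hpre ⟨h0, by omega⟩).1
    have hpap : 0 < m → ∀ row ∈ paper, (paper.length : Int) ≤ (row.length : Int) := by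
      intro h0 row hr
      have h0' : 0 < pattern.length := by omega
      exact_mod_cast (hpre ⟨h0', by omega⟩).2 row hr
    set R0 := pattern.map (fun row => PySem.List.slice row none (some m)) with hR0
    have hb0 : BlockEq m pattern R0 := by
      have := blockEq_base pattern hrow
      simpa [PySem.List.len_eq, hR0, hm] using this
    have hlen0 : pattern.length = R0.length := by simp [hR0]
    have hR0len : R0.length = m.toNat := by simp [hR0, hm]
    have hR0rows : ∀ row ∈ R0, row.length = m.toNat := by
      intro row hr
      simp only [hR0, List.mem_map] at hr
      obtain ⟨prow, hpr, hrr⟩ := hr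
      have : pattern.length ≤ prow.length := hrow _ hpr
      rw [← hrr, PySem.List.slice_to _ (by omega)]
      simp; omega
    have hspin : spinA pattern = spinA R0 := spin_congr _ _ hlen0 hb0
    have hsq0 : ∀ r ∈ R0, r.length = R0.length := by
      intro r hr; rw [hR0rows r hr, hR0len]
    have hr1 : (zipStar R0).reverse = spinA pattern := by
      rw [zipRot_eq_spinA R0 hsq0, ← hspin]
    have hsqS : ∀ X : List (List Int), X.length = m.toNat →
        ∀ r ∈ spinA X, r.length = (spinA X).length := by
      intro X _ r hr; rw [spinA_rows X r hr, spinA_length]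
    have hr2 : (zipStar ((zipStar R0).reverse)).reverse = spinA (spinA pattern) := by
      rw [hr1, zipRot_eq_spinA _ (hsqS pattern (by simp [hm]))]
    have hr3 : (zipStar ((zipStar ((zipStar R0).reverse)).reverse)).reverse
        = spinA (spinA (spinA pattern)) := by
      rw [hr2, zipRot_eq_spinA _ (by
        have : (spinA pattern).length = m.toNat := by rw [spinA_length, hm]; simp
        exact hsqS (spinA pattern) this)]
    -- shapes of the four rotations
    have hshape : ∀ R : List (List Int), R.length = m.toNat →
        ((spinA R).length = m.toNat ∧ ∀ row ∈ spinA R, row.length = m.toNat) := by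
      intro R hl
      refine ⟨by rw [spinA_length, hl], fun row hr => by rw [spinA_rows R row hr, hl]⟩
    have hPlen : pattern.length = m.toNat := by rw [hm]; simp
    obtain ⟨hR1len, hR1rows⟩ := hshape pattern hPlen
    obtain ⟨hR2len, _⟩ := hshape _ hR1len
    obtain ⟨hR3len, _⟩ := hshape _ hR2len
    have hrefl : ∀ X, BlockEq m X X := fun X i j _ _ _ _ => rfl
    -- A's per-position flag, with block temp ≙ R, is the equality test of the pure window with R
    have hflag : ∀ (temp R : List (List Int)) (x y : Int), BlockEq m temp R →
        R.length = m.toNat → (∀ row ∈ R, row.length = m.toNat) →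
        iLoopA paper temp x y m (PySem.List.pyRange 0 m 1) true
          = (winPure paper m x y == R) := by
      intro temp R x y hb hRl hRr
      rw [iLoopA_all, Bool.true_and]
      rw [← allall_eq_beq paper m x y R hRl hRr]
      refine all_congr_mem _ _ _ (fun i hi => ?_)
      rw [PySem.List.mem_pyRange_one] at hi
      refine all_congr_mem _ _ _ (fun j hj => ?_)
      rw [PySem.List.mem_pyRange_one] at hj
      rw [hb i j hi.1 hi.2 hj.1 hj.2]
    have h4 : List.range 4 = [0, 1, 2, 3] := rfl
    have hIs : ∀ x y : Int, isPatternA paper pattern x y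
        = (if winPure paper m x y == R0 then (1:Int) else 0)
          + (if winPure paper m x y == spinA pattern then 1 else 0)
          + (if winPure paper m x y == spinA (spinA pattern) then 1 else 0)
          + (if winPure paper m x y == spinA (spinA (spinA pattern)) then 1 else 0) := by
      intro x y
      unfold isPatternA
      rw [h4]
      simp only [List.foldl_cons, List.foldl_nil, PySem.List.len_eq, ← hm]
      rw [hflag pattern R0 x y hb0 hR0len hR0rows,
          hflag (spinA pattern) (spinA pattern) x y (hrefl _) hR1len hR1rows,
          hflag (spinA (spinA pattern)) (spinA (spinA pattern)) x y (hrefl _)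
            hR2len (hshape _ hR1len).2,
          hflag (spinA (spinA (spinA pattern))) (spinA (spinA (spinA pattern))) x y (hrefl _)
            hR3len (hshape _ hR2len).2]
      ring_nf
    -- B's side: evaluate the 4-lookup fold, then each lookup as a 0/1 double sum
    rw [h4]
    simp only [List.foldl_cons, List.foldl_nil]
    have hwin : ∀ y ∈ PySem.List.pyRange 0 k 1, ∀ x ∈ PySem.List.pyRange 0 k 1,
        winKeyB paper m x y = winPure paper m x y := by
      intro y hy x hx
      rw [PySem.List.mem_pyRange_one] at hy hx
      exact winKeyB_eq_winPure paper m x y (by omega) hx.1 hy.1 (by omega)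
        (fun h0 row hr => by have := hpap h0 row hr; omega)
    have hlook : ∀ R : List (List Int),
        ((PySem.List.pyRange 0 k 1).foldl (fun d y =>
          (PySem.List.pyRange 0 k 1).foldl (fun d x =>
            d.insert (winKeyB paper m x y) (d.getD (winKeyB paper m x y) 0 + 1)) d)
          PySem.Dict.empty).getD R 0
        = ((PySem.List.pyRange 0 k 1).map (fun y =>
            ((PySem.List.pyRange 0 k 1).map (fun x =>
              if winPure paper m x y == R then (1:Int) else 0)).sum)).sum := by
      intro R
      rw [getD_nested]
      simp only [count_map_as_sum]
      have : (PySem.Dict.empty : PySem.Dict (List (List Int)) Int).getD R 0 = 0 := rfl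
      rw [this, zero_add]
      refine congrArg List.sum (List.map_congr_left (fun y hy => ?_))
      refine congrArg List.sum (List.map_congr_left (fun x hx => ?_))
      rw [hwin y hy x hx]
    rw [hr3, hr2, hr1]
    rw [hlook R0, hlook (spinA pattern), hlook (spinA (spinA pattern)),
        hlook (spinA (spinA (spinA pattern)))]
    rw [double_foldl_sum _ (fun x y => isPatternA paper pattern x y)]
    simp only [hIs]
    simp only [PySem.List.sum_map_add_int]
    ring

-- ===== VERDICT (by name: the statement is the Claim_ definition above) =====
theorem solution_spec : Claim_equal_solution := by
  intro paper pattern _ hpre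
  exact main_eq paper pattern hpre
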